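-- pv_equiv track=rewrite | github.com/wyatt8740/soggy-dl | soggy-dl.py | isseparator
-- ===== SOURCE A (Python) =====
-- def isseparator(my_string):
--   if my_string.isspace():
--     return True
--   else:
--     retval=True
--     for c in my_string:
--       if c.isspace() or c == '-' or c == '_':
--         retval = retval and True
--       else:
--         return False
--     return retval
-- ===== SOURCE B (Python) =====
-- def isseparator(my_string):
--   residual = my_string.replace('-', '').replace('_', '')
--   return residual == '' or residual.isspace()
-- ===== Notes on version B (the rewrite author's own statement) =====
-- stated objective: simpler
-- what changed: Replaces the per-character scan with early return by a transform-then-check: strip '-' and '_' via str.replace, then return True iff the residual is empty or all whitespace.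
import Mathlib
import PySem

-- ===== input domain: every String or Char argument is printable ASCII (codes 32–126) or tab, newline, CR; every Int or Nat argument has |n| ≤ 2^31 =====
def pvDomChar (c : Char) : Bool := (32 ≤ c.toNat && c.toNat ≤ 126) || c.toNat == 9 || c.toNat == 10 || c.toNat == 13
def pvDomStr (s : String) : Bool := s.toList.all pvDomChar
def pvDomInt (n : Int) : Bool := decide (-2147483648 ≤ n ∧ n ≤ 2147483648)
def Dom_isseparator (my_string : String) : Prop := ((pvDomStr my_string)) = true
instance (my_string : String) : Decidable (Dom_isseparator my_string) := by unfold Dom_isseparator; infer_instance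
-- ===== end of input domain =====

-- B replaces A's per-character scan-with-early-return by a transform-then-check:
-- strip '-' and '_' with str.replace, then test residual == '' or residual.isspace().  Objective: simpler.

-- ===== PORT A =====
-- the for-loop of A: early `return False` on a bad char, else carries retval along
def pvLoopA : List Char → Bool → Bool
  | [], retval => retval
  | c :: rest, retval =>
    if PySem.Chars.isspace c || c == '-' || c == '_' then pvLoopA rest (retval && true)
    else false

def isseparator (my_string : String) : Bool :=
  if PySem.Str.strIsspace my_string then true
  else pvLoopA my_string.toList true

-- ===== PORT B =====
def isseparator_alt (my_string : String) : Bool :=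
  let residual := PySem.Str.replace (PySem.Str.replace my_string "-" "") "_" ""
  residual == "" || PySem.Str.strIsspace residual

-- ===== PRECONDITION & SPEC =====
def Spec_isseparator (my_string : String) (out : Bool) : Prop := out = isseparator_alt my_string
instance (my_string : String) (out : Bool) : Decidable (Spec_isseparator my_string out) := by unfold Spec_isseparator; infer_instance

-- ===== CLAIM (what is proved, stated in full; the proofs are below) =====
def Claim_equal_isseparator : Prop := ∀ (my_string : String), Dom_isseparator my_string → Spec_isseparator my_string (isseparator my_string)

-- ===== LEMMAS AND PROOFS =====

-- a char is acceptable to A's loop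
def pvGood (c : Char) : Bool := PySem.Chars.isspace c || c == '-' || c == '_'

lemma pvLoopA_true (cs : List Char) : pvLoopA cs true = cs.all pvGood := by
  induction cs with
  | nil => rfl
  | cons c t ih =>
    by_cases h : (PySem.Chars.isspace c || c == '-' || c == '_') = true
    · simp [pvLoopA, h, pvGood, ih]
    · have h' : (PySem.Chars.isspace c || c == '-' || c == '_') = false := by
        cases hx : (PySem.Chars.isspace c || c == '-' || c == '_') <;> simp_all
      simp [pvLoopA, h', pvGood]

lemma pvReplaceGo_filter (d : Char) (l : List Char) (fuel : Nat) (acc : List Char)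
    (h : l.length <= fuel) :
    PySem.Chars.replace.go [d] [] fuel l acc = acc.reverse ++ l.filter (fun c => c != d) := by
  induction l generalizing fuel acc with
  | nil => cases fuel <;> simp [PySem.Chars.replace.go]
  | cons c t ih =>
    cases fuel with
    | zero => simp at h
    | succ n =>
      simp at h
      by_cases hc : d = c
      · subst hc
        simp [PySem.Chars.replace.go, List.isPrefixOf, ih n acc h]
      · have hdc : (d == c) = false := beq_eq_false_iff_ne.mpr hc
        have hcd : (c == d) = false := beq_eq_false_iff_ne.mpr (Ne.symm hc)
        simp [PySem.Chars.replace.go, List.isPrefixOf, hdc,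
              ih n (c :: acc) h, List.filter_cons]
        exact fun hh => hc hh.symm

lemma pvReplace_single (d : Char) (l : List Char) :
    PySem.Chars.replace l [d] [] = l.filter (fun c => c != d) := by
  simp [PySem.Chars.replace]
  simpa using pvReplaceGo_filter d l l.length [] (le_refl _)

lemma pvFiltered_all (cs : List Char) :
    ((cs.filter (fun c => c != '-')).filter (fun c => c != '_')).all PySem.Chars.isspace
      = cs.all pvGood := by
  simp only [List.all_filter]
  have hpt : ∀ c : Char,
      (!(c != '-') || (!(c != '_') || PySem.Chars.isspace c)) = pvGood c := by
    intro c
    by_cases h1 : c = '-'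
    · simp [pvGood, h1]
    · by_cases h2 : c = '_'
      · simp [pvGood, h2]
      · simp [pvGood, bne, beq_eq_false_iff_ne.mpr h1, beq_eq_false_iff_ne.mpr h2]
  simp only [hpt]

lemma pvEmpty_beq (r : String) : (r == "") = r.toList.isEmpty := by
  rw [Bool.eq_iff_iff, beq_iff_eq, List.isEmpty_iff]
  constructor
  · intro h; subst h; rfl
  · intro h; exact String.toList_inj.mp (by simpa using h)

theorem isseparator_eq (s : String) : isseparator s = isseparator_alt s := by
  unfold isseparator isseparator_alt
  show (if PySem.Str.strIsspace s then true else pvLoopA s.toList true)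
      = ((PySem.Str.replace (PySem.Str.replace s "-" "") "_" "") == ""
         || PySem.Str.strIsspace (PySem.Str.replace (PySem.Str.replace s "-" "") "_" ""))
  have hb : (PySem.Str.replace (PySem.Str.replace s "-" "") "_" "").toList
      = (s.toList.filter (fun c => c != '-')).filter (fun c => c != '_') := by
    have h1 : ("-" : String).toList = ['-'] := rfl
    have h2 : ("_" : String).toList = ['_'] := rfl
    have h3 : ("" : String).toList = [] := rfl
    rw [PySem.Str.toList_replace, h2, h3, pvReplace_single,
        PySem.Str.toList_replace, h1, h3, pvReplace_single]
  rw [pvEmpty_beq, PySem.Str.strIsspace_eq, PySem.Str.strIsspace_eq, hb]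
  set cs := s.toList with hcs
  set rl := (cs.filter (fun c => c != '-')).filter (fun c => c != '_') with hrl
  have hR : (rl.isEmpty || PySem.Chars.strIsspace rl) = cs.all pvGood := by
    rw [PySem.Chars.strIsspace, ← pvFiltered_all cs, ← hrl]
    cases rl <;> simp
  rw [hR, PySem.Chars.strIsspace]
  by_cases hs : (!cs.isEmpty && cs.all PySem.Chars.isspace) = true
  · rw [if_pos hs]
    have hall : cs.all pvGood = true := by
      simp only [Bool.and_eq_true, List.all_eq_true] at hs ⊢
      intro c hc
      simp [pvGood, hs.2 c hc]
    exact hall.symm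
  · rw [if_neg hs, pvLoopA_true]

-- ===== VERDICT (by name: the statement is the Claim_ definition above) =====
theorem isseparator_spec : Claim_equal_isseparator := by
  intro s _
  exact isseparator_eq s
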